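-- pv_equiv track=rewrite | github.com/T33py/AdventOfCode2022 | Day6/task1.py | get_start_marker
-- ===== SOURCE A (Python) =====
-- def get_start_marker(input):
--     marker = 0
--     buffer = []
--
--     for char in input:
--         buffer.append(char)
--         marker += 1
--         if len(buffer) > 4:
--             buffer.pop(0)
--         if not contains_duplicate(buffer) and len(buffer) == 4:
--             return marker
--
--     return marker
--
-- def contains_duplicate(input):
--     for i in range(len(input)):
--         for j in range(len(input)):
--             if i != j and input[i] == input[j]:
--                 return True
--     return False
-- ===== SOURCE B (Python) =====
-- def get_start_marker(input):
--     seen = {}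
--     left = 0
--     for i, c in enumerate(input):
--         if c in seen and seen[c] >= left:
--             left = seen[c] + 1
--         seen[c] = i
--         if i - left + 1 == 4:
--             return i + 1
--     return len(input)
-- ===== Notes on version B (the rewrite author's own statement) =====
-- stated objective: faster
-- what changed: Replaced the rebuilt size-4 buffer with its O(k^2) nested-loop duplicate scan by a single-pass sliding window keeping each character's last index in a dict and a left pointer.
import Mathlib
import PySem

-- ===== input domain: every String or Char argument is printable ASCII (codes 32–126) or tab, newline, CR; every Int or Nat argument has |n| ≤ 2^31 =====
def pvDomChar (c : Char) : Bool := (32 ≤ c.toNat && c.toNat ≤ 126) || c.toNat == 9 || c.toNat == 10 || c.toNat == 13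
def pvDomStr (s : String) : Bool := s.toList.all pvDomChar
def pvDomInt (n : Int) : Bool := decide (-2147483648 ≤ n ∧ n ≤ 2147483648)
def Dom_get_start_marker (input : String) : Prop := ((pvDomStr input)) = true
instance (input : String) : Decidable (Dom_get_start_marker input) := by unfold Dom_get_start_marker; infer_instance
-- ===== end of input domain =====

-- B replaces A's rebuilt 4-char buffer with its quadratic duplicate rescan by a one-pass
-- sliding window (dict of last indices + left pointer); return values proved equal.

-- ===== PORT A =====
-- nested index loops with early return True = .any over the two ranges
def contains_duplicate (input : List Char) : Bool :=
  (PySem.List.pyRange 0 input.length 1).any (fun i =>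
    (PySem.List.pyRange 0 input.length 1).any (fun j =>
      decide (i ≠ j) && (PySem.List.pyGet? input i == PySem.List.pyGet? input j)))

-- the for-loop with early return, carrying (marker, buffer); buffer.pop(0) = .drop 1
def getStartLoopA : List Char → Int → List Char → Int
  | [], marker, _ => marker
  | c :: rest, marker, buffer =>
    let buffer := buffer ++ [c]
    let marker := marker + 1
    let buffer := if buffer.length > 4 then buffer.drop 1 else buffer
    if (!contains_duplicate buffer) && buffer.length == 4 then marker
    else getStartLoopA rest marker buffer

def get_start_marker (input : String) : Int :=
  getStartLoopA input.toList 0 []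

-- ===== PORT B =====
-- enumerate loop carrying (i, seen, left); 'c in seen and seen[c] >= left' = match on get?
def getStartLoopB (n : Int) : List Char → Int → PySem.Dict Char Int → Int → Int
  | [], _, _, _ => n
  | c :: rest, i, seen, left =>
    let left := match seen.get? c with
      | some j => if left ≤ j then j + 1 else left
      | none => left
    let seen := seen.insert c i
    if i - left + 1 == 4 then i + 1 else getStartLoopB n rest (i + 1) seen left

def get_start_marker_alt (input : String) : Int :=
  getStartLoopB (input.toList.length : Int) input.toList 0 PySem.Dict.empty 0

-- ===== PRECONDITION & SPEC =====
def Spec_get_start_marker (input : String) (out : Int) : Prop := out = get_start_marker_alt input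
instance (input : String) (out : Int) : Decidable (Spec_get_start_marker input out) := by unfold Spec_get_start_marker; infer_instance

-- ===== CLAIM (what is proved, stated in full; the proofs are below) =====
def Claim_equal_get_start_marker : Prop := ∀ (input : String), Dom_get_start_marker input → Spec_get_start_marker input (get_start_marker input)

-- ===== LEMMAS AND PROOFS =====

-- last index of c in p, if any (proof-side helper)
def lastIdx? : List Char → Char → Option Nat
  | [], _ => none
  | a :: p, c =>
    match lastIdx? p c with
    | some j => some (j + 1)
    | none => if a = c then some 0 else none

-- smallest l such that p.drop l has no duplicates
def minl (p : List Char) : Nat :=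
  Nat.find (show ∃ l, (p.drop l).Nodup from ⟨p.length, by simp⟩)

lemma minl_nodup (p : List Char) : (p.drop (minl p)).Nodup :=
  Nat.find_spec (show ∃ l, (p.drop l).Nodup from ⟨p.length, by simp⟩)

lemma minl_le {p : List Char} {l : Nat} (h : (p.drop l).Nodup) : minl p ≤ l :=
  Nat.find_min' _ h

lemma minl_le_length (p : List Char) : minl p ≤ p.length :=
  minl_le (by simp)

lemma not_nodup_of_lt_minl {p : List Char} {l : Nat} (h : l < minl p) :
    ¬ (p.drop l).Nodup := Nat.find_min _ h

lemma nodup_drop_of_minl_le {p : List Char} {l : Nat} (h : minl p ≤ l) :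
    (p.drop l).Nodup := by
  have := (minl_nodup p).sublist (List.drop_sublist (l - minl p) (p.drop (minl p)))
  rwa [List.drop_drop, Nat.add_sub_cancel' h] at this

lemma lastIdx?_snoc (p : List Char) (c ch : Char) :
    lastIdx? (p ++ [c]) ch = if ch = c then some p.length else lastIdx? p ch := by
  induction p with
  | nil =>
    simp only [List.nil_append, lastIdx?]
    by_cases h : ch = c
    · subst h; simp
    · rw [if_neg (fun e => h e.symm), if_neg h]
  | cons a p ih =>
    simp only [List.cons_append, lastIdx?, ih]
    by_cases h : ch = c <;> simp [h, lastIdx?]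

lemma lastIdx?_none {p : List Char} {c : Char} (h : lastIdx? p c = none) : c ∉ p := by
  induction p with
  | nil => simp
  | cons a p ih =>
    rcases h' : lastIdx? p c with _ | j
    · have h2 : (if a = c then some 0 else none : Option Nat) = none := by
        simpa only [lastIdx?, h'] using h
      by_cases ha : a = c
      · rw [if_pos ha] at h2; cases h2
      · intro hmem
        rcases List.mem_cons.mp hmem with rfl | hm
        · exact ha rfl
        · exact ih h' hm
    · have h2 : (some (j + 1) : Option Nat) = none := by
        simpa only [lastIdx?, h'] using h
      cases h2

lemma lastIdx?_spec {p : List Char} {c : Char} {j : Nat} (h : lastIdx? p c = some j) :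
    j < p.length ∧ p[j]? = some c ∧ c ∉ p.drop (j + 1) := by
  induction p generalizing j with
  | nil => simp [lastIdx?] at h
  | cons a p ih =>
    rcases h' : lastIdx? p c with _ | j0
    · have h2 : (if a = c then some 0 else none : Option Nat) = some j := by
        simpa only [lastIdx?, h'] using h
      by_cases ha : a = c
      · rw [if_pos ha] at h2
        cases h2
        subst ha
        exact ⟨by simp, by simp, lastIdx?_none h'⟩
      · rw [if_neg ha] at h2; cases h2
    · have h2 : (some (j0 + 1) : Option Nat) = some j := by
        simpa only [lastIdx?, h'] using h
      cases h2
      obtain ⟨h1, h2, h3⟩ := ih h'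
      exact ⟨by simpa using h1, by simpa using h2, by simpa using h3⟩

-- dropping l ≤ p.length commutes with the appended char
lemma drop_snoc {p : List Char} {c : Char} {l : Nat} (h : l ≤ p.length) :
    (p ++ [c]).drop l = p.drop l ++ [c] :=
  List.drop_append_of_le_length h

-- case "c not in the current window": left unchanged
lemma minl_snoc_not_mem {p : List Char} {c : Char} (h : c ∉ p.drop (minl p)) :
    minl (p ++ [c]) = minl p := by
  apply le_antisymm
  · apply minl_le
    rw [drop_snoc (minl_le_length p)]
    refine List.nodup_append.mpr ⟨minl_nodup p, by simp, ?_⟩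
    intro a ha b hb
    rw [List.mem_singleton] at hb
    subst hb
    exact fun e => h (e ▸ ha)
  · by_contra hlt
    push_neg at hlt
    have hnd := minl_nodup (p ++ [c])
    rw [drop_snoc (le_trans (le_of_lt hlt) (minl_le_length p))] at hnd
    exact not_nodup_of_lt_minl hlt (hnd.sublist (List.sublist_append_left _ _))

-- case "c occurs in the current window at last index j": left jumps to j+1
lemma minl_snoc_mem {p : List Char} {c : Char} {j : Nat}
    (h : lastIdx? p c = some j) (hj : minl p ≤ j) :
    minl (p ++ [c]) = j + 1 := by
  obtain ⟨hjlen, hget, hnot⟩ := lastIdx?_spec h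
  apply le_antisymm
  · apply minl_le
    rw [drop_snoc (by omega)]
    refine List.nodup_append.mpr ⟨nodup_drop_of_minl_le (show minl p ≤ j + 1 by omega), by simp, ?_⟩
    intro a ha b hb
    rw [List.mem_singleton] at hb
    subst hb
    exact fun e => hnot (e ▸ ha)
  · by_contra hlt
    push_neg at hlt
    have hle : minl (p ++ [c]) ≤ j := by omega
    have hnd := minl_nodup (p ++ [c])
    rw [drop_snoc (by omega)] at hnd
    obtain ⟨-, -, hdisj⟩ := List.nodup_append.mp hnd
    have hmem : c ∈ p.drop (minl (p ++ [c])) := by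
      have hg : (p.drop (minl (p ++ [c])))[j - minl (p ++ [c])]? = some c := by
        rw [List.getElem?_drop]
        rwa [Nat.add_sub_cancel' hle]
      exact List.mem_of_getElem? hg
    exact hdisj c hmem c (List.mem_singleton_self c) rfl

-- the left pointer never moves backwards when a char is appended
lemma minl_le_minl_snoc (p : List Char) (c : Char) : minl p ≤ minl (p ++ [c]) := by
  by_cases h : p.length ≤ minl (p ++ [c])
  · exact le_trans (minl_le_length p) h
  · push_neg at h
    have hnd := minl_nodup (p ++ [c])
    rw [drop_snoc (le_of_lt h)] at hnd
    exact minl_le (hnd.sublist (List.sublist_append_left _ _))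

-- A's duplicate scan decides Nodup
lemma contains_duplicate_eq_true (b : List Char) :
    contains_duplicate b = true ↔ ¬ b.Nodup := by
  unfold contains_duplicate
  rw [List.nodup_iff_getElem?_ne_getElem?]
  simp only [List.any_eq_true, PySem.List.mem_pyRange_one, Bool.and_eq_true,
    decide_eq_true_eq]
  push_neg
  constructor
  · rintro ⟨i, ⟨hi0, hin⟩, j, ⟨hj0, hjn⟩, hne, heq⟩
    rw [PySem.List.pyGet?_of_nonneg b hi0, PySem.List.pyGet?_of_nonneg b hj0,
      beq_iff_eq] at heq
    have hin' : i.toNat < b.length := by omega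
    have hjn' : j.toNat < b.length := by omega
    rcases Nat.lt_trichotomy i.toNat j.toNat with hlt | heqn | hgt
    · exact ⟨i.toNat, j.toNat, hlt, hjn', heq⟩
    · exact absurd (show i = j by omega) hne
    · exact ⟨j.toNat, i.toNat, hgt, hin', heq.symm⟩
  · rintro ⟨i, j, hij, hjlen, heq⟩
    refine ⟨(i : Int), ⟨by omega, by omega⟩, (j : Int), ⟨by omega, by omega⟩,
      by omega, ?_⟩
    rw [PySem.List.pyGet?_natCast, PySem.List.pyGet?_natCast, heq, beq_self_eq_true]

-- the buffer A maintains is the ≤4-char tail of the processed prefix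
lemma buffer_step (p : List Char) (c : Char) :
    (if (p.drop (p.length - 4) ++ [c]).length > 4
     then (p.drop (p.length - 4) ++ [c]).drop 1
     else (p.drop (p.length - 4) ++ [c])) =
    (p ++ [c]).drop ((p ++ [c]).length - 4) := by
  have hL : (p.drop (p.length - 4) ++ [c]).length = p.length - (p.length - 4) + 1 := by
    simp
  have hq : (p ++ [c]).length = p.length + 1 := by
    simp
  by_cases h : 4 ≤ p.length
  · rw [if_pos (by omega : (p.drop (p.length - 4) ++ [c]).length > 4)]
    rw [show (p ++ [c]).length - 4 = p.length - 3 from by omega]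
    rw [drop_snoc (show p.length - 3 ≤ p.length from by omega)]
    rw [List.drop_append_of_le_length
      (show 1 ≤ (p.drop (p.length - 4)).length from by simp only [List.length_drop]; omega),
      List.drop_drop]
    rw [show p.length - 4 + 1 = p.length - 3 from by omega]
  · rw [if_neg (show ¬ (p.drop (p.length - 4) ++ [c]).length > 4 from by omega)]
    rw [show p.length - 4 = 0 from by omega, List.drop_zero]
    rw [show (p ++ [c]).length - 4 = 0 from by omega, List.drop_zero]

-- A's branch condition characterised by the window size
lemma condA_iff (q : List Char) :
    (((!contains_duplicate (q.drop (q.length - 4))) && (q.drop (q.length - 4)).length == 4) = true)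
      ↔ (4 ≤ q.length ∧ minl q ≤ q.length - 4) := by
  have hlen : (q.drop (q.length - 4)).length = q.length - (q.length - 4) := by simp
  simp only [Bool.and_eq_true, Bool.not_eq_true', beq_iff_eq]
  constructor
  · rintro ⟨hdup, h4⟩
    have hnd : (q.drop (q.length - 4)).Nodup := by
      by_contra hn
      rw [← contains_duplicate_eq_true] at hn
      rw [hn] at hdup
      cases hdup
    exact ⟨by omega, minl_le hnd⟩
  · rintro ⟨h4, hm⟩
    have hne : contains_duplicate (q.drop (q.length - 4)) ≠ true :=
      fun ht => (contains_duplicate_eq_true _).mp ht (nodup_drop_of_minl_le hm)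
    exact ⟨Bool.eq_false_iff.mpr hne, by omega⟩

-- main loop correspondence
lemma loop_eq : ∀ (rest p : List Char) (seen : PySem.Dict Char Int),
    (∀ ch, seen.get? ch = (lastIdx? p ch).map (fun j : Nat => (j : Int))) →
    p.length - minl p ≤ 3 →
    getStartLoopA rest (p.length : Int) (p.drop (p.length - 4)) =
    getStartLoopB ((p.length + rest.length : Nat) : Int) rest (p.length : Int) seen (minl p : Int) := by
  intro rest
  induction rest with
  | nil =>
    intro p seen _ _
    simp [getStartLoopA, getStartLoopB]
  | cons c rest ih =>
    intro p seen hseen hsize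
    rw [getStartLoopA, getStartLoopB]
    have hleft :
        (match seen.get? c with
          | some j => if (minl p : Int) ≤ j then j + 1 else (minl p : Int)
          | none => (minl p : Int)) = (minl (p ++ [c]) : Int) := by
      rw [hseen c]
      rcases h' : lastIdx? p c with _ | j
      · simp only [Option.map_none]
        rw [minl_snoc_not_mem (fun hm => lastIdx?_none h' (List.mem_of_mem_drop hm))]
      · simp only [Option.map_some]
        by_cases hj : minl p ≤ j
        · rw [if_pos (by exact_mod_cast hj), minl_snoc_mem h' hj]
          push_cast; ring
        · rw [if_neg (by exact_mod_cast hj)]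
          obtain ⟨_, _, hnot⟩ := lastIdx?_spec h'
          rw [minl_snoc_not_mem]
          intro hm
          apply hnot
          have hdr : p.drop (minl p) = (p.drop (j + 1)).drop (minl p - (j + 1)) := by
            rw [List.drop_drop, Nat.add_sub_cancel' (by omega : j + 1 ≤ minl p)]
          rw [hdr] at hm
          exact List.mem_of_mem_drop hm
    rw [hleft, buffer_step]
    have hq4 : minl (p ++ [c]) ≤ (p ++ [c]).length := minl_le_length _
    have hqlen : (p ++ [c]).length = p.length + 1 := by simp
    have hsz4 : (p ++ [c]).length - minl (p ++ [c]) ≤ 4 := by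
      have := minl_le_minl_snoc p c
      omega
    by_cases hC : (p ++ [c]).length - minl (p ++ [c]) = 4
    · rw [if_pos, if_pos]
      · rw [beq_iff_eq]
        omega
      · rw [condA_iff]
        omega
    · rw [if_neg, if_neg]
      · have hseen' : ∀ ch, (seen.insert c (p.length : Int)).get? ch =
            (lastIdx? (p ++ [c]) ch).map (fun j : Nat => (j : Int)) := by
          intro ch
          rw [PySem.Dict.get?_insert, lastIdx?_snoc, hseen ch]
          by_cases h : ch = c <;> simp [h]
        have hsz' : (p ++ [c]).length - minl (p ++ [c]) ≤ 3 := by omega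
        have hih := ih (p ++ [c]) (seen.insert c (p.length : Int)) hseen' hsz'
        have e2 : (((p ++ [c]).length : Nat) : Int) = (p.length : Int) + 1 := by
          simp
        have e3 : ((p ++ [c]).length + rest.length : Nat) = p.length + (c :: rest).length := by
          simp only [List.length_append, List.length_cons, List.length_singleton,
            List.length_nil]
          omega
        rw [e2, e3] at hih
        exact hih
      · rw [beq_iff_eq]
        omega
      · rw [condA_iff]
        omega

-- ===== VERDICT (by name: the statement is the Claim_ definition above) =====
theorem get_start_marker_spec : Claim_equal_get_start_marker := by
  intro input _
  unfold Spec_get_start_marker get_start_marker get_start_marker_alt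
  have hm0 : minl ([] : List Char) = 0 := Nat.le_zero.mp (minl_le (by simp))
  have h := loop_eq input.toList [] PySem.Dict.empty
    (by intro ch; simp [lastIdx?, PySem.Dict.get?_empty]) (by simp)
  rw [hm0] at h
  simpa using h
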